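-- pv_equiv track=rewrite | github.com/dong99u/codetree-TILs | 240311/진수 to 진수/transformation-of-number-system.py | a_to_dec
-- ===== SOURCE A (Python) =====
-- def a_to_dec(num: str, a: int) -> int:
--
--     weight = 1
--     decimal = 0
--
--     for n in reversed(num):
--
--         if int(n) == 0:
--             weight *= a
--             continue
--
--         decimal += weight * int(n)
--         weight *= a
--
--     return decimal
-- ===== SOURCE B (Python) =====
-- def a_to_dec(num: str, a: int) -> int:
--     def go(s: str, acc: int) -> int:
--         if not s:
--             return acc
--         return go(s[1:], acc * a + int(s[0]))
--     return go(num, 0)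
-- ===== Notes on version B (the rewrite author's own statement) =====
-- stated objective: simpler
-- what changed: Replaces the reversed-iteration positional-weight loop (with its zero-digit special case) by a tail-recursive forward Horner's-method pass with a single accumulator.
import Mathlib
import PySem

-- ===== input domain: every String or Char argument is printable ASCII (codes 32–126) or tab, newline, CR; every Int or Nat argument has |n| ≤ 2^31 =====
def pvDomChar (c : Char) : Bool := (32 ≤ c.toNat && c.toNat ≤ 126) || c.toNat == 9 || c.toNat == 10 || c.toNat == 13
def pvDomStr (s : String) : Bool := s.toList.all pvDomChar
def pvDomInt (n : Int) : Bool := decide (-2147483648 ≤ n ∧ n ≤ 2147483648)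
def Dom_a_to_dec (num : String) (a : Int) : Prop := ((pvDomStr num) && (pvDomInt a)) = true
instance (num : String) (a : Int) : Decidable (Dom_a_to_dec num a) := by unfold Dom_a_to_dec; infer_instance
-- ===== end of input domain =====

-- B replaces A's reversed-iteration weight accumulation (with its zero-digit special case)
-- by a tail-recursive forward Horner pass with a single accumulator (objective: simpler).

-- ===== PORT A =====
-- A iterates over reversed(num), keeping (weight, decimal); int(n) is PySem.Int.ofChars? on
-- the one-character list (none = ValueError, excluded by Pre_; the final .getD 0 is only
-- reached outside Pre_).
def a_to_dec (num : String) (a : Int) : Int :=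
  (((num.toList.reverse.foldl
      (fun st c => st.bind (fun wd =>
        (PySem.Int.ofChars? [c]).map (fun v =>
          if v = 0 then (wd.1 * a, wd.2)
          else (wd.1 * a, wd.2 + wd.1 * v))))
      (some ((1 : Int), (0 : Int)))).map (·.2)).getD 0)

-- ===== PORT B =====
-- B's inner recursive helper go: empty string → acc; else recurse on the tail with
-- acc * a + int(first char); int raising (non-digit) is the none case, excluded by Pre_.
def pvGoB (a : Int) : List Char → Int → Option Int
  | [], acc => some acc
  | c :: t, acc =>
    match PySem.Int.ofChars? [c] with
    | none => none
    | some v => pvGoB a t (acc * a + v)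

def a_to_dec_alt (num : String) (a : Int) : Int :=
  (pvGoB a num.toList 0).getD 0

-- ===== PRECONDITION & SPEC =====
-- Pre_ excludes exactly the inputs where int(n) raises ValueError (a character of num that
-- is not an ASCII decimal digit); A returns on no such input.
def Pre_a_to_dec (num : String) (a : Int) : Prop :=
  (num.toList.all (fun c => ['0','1','2','3','4','5','6','7','8','9'].contains c)) = true
instance (num : String) (a : Int) : Decidable (Pre_a_to_dec num a) := by
  unfold Pre_a_to_dec; infer_instance
def pvWitness_a_to_dec : String × Int := ("12", 8)
def Spec_a_to_dec (num : String) (a : Int) (out : Int) : Prop := out = a_to_dec_alt num a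
instance (num : String) (a : Int) (out : Int) : Decidable (Spec_a_to_dec num a out) := by unfold Spec_a_to_dec; infer_instance

-- ===== CLAIM (what is proved, stated in full; the proofs are below) =====
def Claim_equal_a_to_dec : Prop := ∀ (num : String) (a : Int), Dom_a_to_dec num a → Pre_a_to_dec num a → Spec_a_to_dec num a (a_to_dec num a)

-- ===== LEMMAS AND PROOFS =====

-- digit value of a character
def pvVal (c : Char) : Int := (c.toNat : Int) - 48

theorem ofChars?_digit (c : Char)
    (h : c ∈ ['0','1','2','3','4','5','6','7','8','9']) :
    PySem.Int.ofChars? [c] = some (pvVal c) := by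
  fin_cases h <;> decide

-- pure Horner evaluation of a digit list from accumulator s
def pvHorner (a : Int) (s : Int) (l : List Char) : Int :=
  l.foldl (fun acc c => acc * a + pvVal c) s

theorem pvHorner_cons (a s : Int) (c : Char) (l : List Char) :
    pvHorner a s (c :: l) = pvHorner a (s * a + pvVal c) l := rfl

theorem pvHorner_scale (a : Int) (l : List Char) :
    ∀ s, pvHorner a s l = s * a ^ l.length + pvHorner a 0 l := by
  induction l with
  | nil => intro s; simp [pvHorner]
  | cons c t ih =>
    intro s
    rw [pvHorner_cons, pvHorner_cons, ih (s * a + pvVal c), ih (0 * a + pvVal c)]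
    simp [List.length_cons, pow_succ]
    ring

-- B's recursion computes pvHorner on all-digit lists
theorem goB_eq (a : Int) (l : List Char)
    (h : ∀ c ∈ l, c ∈ ['0','1','2','3','4','5','6','7','8','9']) :
    ∀ s : Int, pvGoB a l s = some (pvHorner a s l) := by
  induction l with
  | nil => intro s; simp [pvGoB, pvHorner]
  | cons c t ih =>
    intro s
    have hc := ofChars?_digit c (h c (List.mem_cons_self))
    have ht : ∀ x ∈ t, x ∈ ['0','1','2','3','4','5','6','7','8','9'] :=
      fun x hx => h x (List.mem_cons_of_mem _ hx)
    simp only [pvGoB, hc]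
    rw [ih ht (s * a + pvVal c), pvHorner_cons]

-- A's fold, written as a foldr over the unreversed list, yields (weight·aⁿ, d + weight·Horner)
theorem a_foldr_eq (a : Int) (l : List Char)
    (h : ∀ c ∈ l, c ∈ ['0','1','2','3','4','5','6','7','8','9']) :
    ∀ w d : Int,
      l.foldr (fun c st => st.bind (fun wd =>
          (PySem.Int.ofChars? [c]).map (fun v =>
            if v = 0 then (wd.1 * a, wd.2)
            else (wd.1 * a, wd.2 + wd.1 * v)))) (some (w, d))
        = some (w * a ^ l.length, d + w * pvHorner a 0 l) := by
  induction l with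
  | nil => intro w d; simp [pvHorner]
  | cons c t ih =>
    intro w d
    have hc := ofChars?_digit c (h c (List.mem_cons_self))
    have ht : ∀ x ∈ t, x ∈ ['0','1','2','3','4','5','6','7','8','9'] :=
      fun x hx => h x (List.mem_cons_of_mem _ hx)
    have hV : pvHorner a 0 (c :: t) = pvVal c * a ^ t.length + pvHorner a 0 t := by
      rw [pvHorner_cons, pvHorner_scale]; ring_nf
    simp only [List.foldr_cons, ih ht w d, Option.bind_some, hc, Option.map_some]
    by_cases h0 : pvVal c = 0
    · rw [if_pos h0]
      simp only [Option.some.injEq, Prod.mk.injEq, List.length_cons, pow_succ]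
      exact ⟨by ring, by rw [hV, h0]; ring⟩
    · rw [if_neg h0]
      simp only [Option.some.injEq, Prod.mk.injEq, List.length_cons, pow_succ]
      exact ⟨by ring, by rw [hV]; ring⟩

-- ===== VERDICT (by name: the statement is the Claim_ definition above) =====
theorem a_to_dec_spec : Claim_equal_a_to_dec := by
  intro num a _ hpre0
  have hpre : ∀ c ∈ num.toList, c ∈ ['0','1','2','3','4','5','6','7','8','9'] := by
    simpa [Pre_a_to_dec, List.all_eq_true] using hpre0
  unfold Spec_a_to_dec a_to_dec a_to_dec_alt
  rw [List.foldl_reverse, a_foldr_eq a num.toList hpre 1 0,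
      goB_eq a num.toList hpre 0]
  simp
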